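-- pv_equiv track=rewrite | github.com/Shirohi-git/AtCoder | ur_past/past202005_k.py | search
-- ===== SOURCE A (Python) =====
-- def search(NUM, DESK, WHERE):
--     if DESK[NUM] != -1:
--         return DESK[NUM]
--     else:
--         if WHERE[NUM] < 0:
--             return - WHERE[NUM]
--         DESK[NUM] = search(WHERE[NUM], DESK, WHERE)
--         return DESK[NUM]
-- ===== SOURCE B (Python) =====
-- def search(NUM, DESK, WHERE):
--     path = []
--     cur = NUM
--     while DESK[cur] == -1 and WHERE[cur] >= 0:
--         path.append(cur)
--         cur = WHERE[cur]
--     value = DESK[cur] if DESK[cur] != -1 else -WHERE[cur]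
--     for node in path:
--         DESK[node] = value
--     return value
-- ===== Notes on version B (the rewrite author's own statement) =====
-- stated objective: alternative
-- what changed: Replaced the memoized recursion by an explicit iterative pointer-chase that records the visited path in a list and back-fills the cache in one final pass (same writes, no recursion).
import Mathlib
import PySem

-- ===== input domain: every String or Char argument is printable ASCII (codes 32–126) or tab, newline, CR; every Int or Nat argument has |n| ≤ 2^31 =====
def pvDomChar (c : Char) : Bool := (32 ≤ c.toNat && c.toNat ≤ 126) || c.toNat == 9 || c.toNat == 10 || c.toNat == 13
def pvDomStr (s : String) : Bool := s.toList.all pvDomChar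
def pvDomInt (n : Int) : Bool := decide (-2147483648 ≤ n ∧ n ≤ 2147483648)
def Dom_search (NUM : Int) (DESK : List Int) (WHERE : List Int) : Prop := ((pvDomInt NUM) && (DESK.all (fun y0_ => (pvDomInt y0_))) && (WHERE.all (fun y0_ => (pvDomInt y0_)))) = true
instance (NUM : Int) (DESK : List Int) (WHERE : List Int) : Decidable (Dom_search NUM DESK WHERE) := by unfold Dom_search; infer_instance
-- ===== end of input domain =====

-- B replaces A's memoized recursion by an iterative pointer-chase that records the path and
-- back-fills the cache in one final pass (objective: alternative decomposition, same cost).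
-- Both versions mutate DESK in Python (the same entries get the same values); the equivalence
-- proved here is about the RETURN value.

-- ===== PORT A =====
-- A's recursion, fuel-bounded (fuel 2*|DESK|+1 covers every terminating run: the visited
-- indices are distinct Ints in [-|DESK|, |DESK|)); the DESK write-back is threaded literally.
def searchGo (fuel : Nat) (NUM : Int) (DESK : List Int) (WHERE : List Int) : Int × List Int :=
  match fuel with
  | 0 => (0, DESK)
  | Nat.succ fuel =>
    match PySem.List.pyGet? DESK NUM with
    | none => (0, DESK)
    | some d =>
      if d ≠ -1 then (d, DESK)
      else
        match PySem.List.pyGet? WHERE NUM with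
        | none => (0, DESK)
        | some w =>
          if w < 0 then (-w, DESK)
          else
            let r := searchGo fuel w DESK WHERE
            (r.1, PySem.List.pySetD r.2 NUM r.1)

def search (NUM : Int) (DESK : List Int) (WHERE : List Int) : Int :=
  (searchGo (2 * DESK.length + 1) NUM DESK WHERE).1

-- ===== PORT B =====
-- the while-loop: follow WHERE while DESK[cur] == -1 and WHERE[cur] >= 0, collecting the path
def altLoop (DESK : List Int) (WHERE : List Int) : Nat → Int → List Int → Int × List Int
  | 0, cur, path => (cur, path)
  | Nat.succ fuel, cur, path =>
    match PySem.List.pyGet? DESK cur with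
    | none => (cur, path)
    | some d =>
      if d = -1 then
        match PySem.List.pyGet? WHERE cur with
        | none => (cur, path)
        | some w =>
          if 0 ≤ w then altLoop DESK WHERE fuel w (path ++ [cur])
          else (cur, path)
      else (cur, path)

-- the back-filling for-loop over the recorded path (DESK[node] = value for node in path)
def altFill (value : Int) (path : List Int) (DESK : List Int) : List Int :=
  path.foldl (fun d node => PySem.List.pySetD d node value) DESK

def search_alt (NUM : Int) (DESK : List Int) (WHERE : List Int) : Int :=
  let r := altLoop DESK WHERE (2 * DESK.length + 1) NUM []
  let cur := r.1
  let value := if PySem.List.pyGetD DESK cur 0 ≠ -1 then PySem.List.pyGetD DESK cur 0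
               else -(PySem.List.pyGetD WHERE cur 0)
  let _DESK := altFill value r.2 DESK   -- Python B's cache writes (unobservable in the return value)
  value

-- ===== PRECONDITION & SPEC =====
-- the link map of the input graph and its j-th iterate from NUM
def linkStep (WHERE : List Int) (c : Int) : Int := PySem.List.pyGetD WHERE c 0
def chainNode (WHERE : List Int) (NUM : Int) (j : Nat) : Int := (linkStep WHERE)^[j] NUM

-- Pre_search (closed-form reachability on the input graph): some iterate k of the WHERE-link
-- map, starting at NUM, is a stopping index (a cached DESK entry, or a negative WHERE entry),
-- every earlier iterate being an in-range index with an uncached DESK entry and a nonnegative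
-- WHERE link.  A terminating run visits pairwise-distinct Int indices of [-|DESK|, |DESK|),
-- so k < 2*|DESK|+1 loses nothing: this is exactly the set of inputs on which Python A
-- returns; elsewhere it raises IndexError or RecursionError.
def Pre_search (NUM : Int) (DESK : List Int) (WHERE : List Int) : Prop :=
  ∃ k < 2 * DESK.length + 1,
    (∀ j < k,
      (-(DESK.length : Int) ≤ chainNode WHERE NUM j ∧ chainNode WHERE NUM j < (DESK.length : Int)) ∧
      PySem.List.pyGetD DESK (chainNode WHERE NUM j) 0 = -1 ∧
      (-(WHERE.length : Int) ≤ chainNode WHERE NUM j ∧ chainNode WHERE NUM j < (WHERE.length : Int)) ∧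
      0 ≤ linkStep WHERE (chainNode WHERE NUM j)) ∧
    (-(DESK.length : Int) ≤ chainNode WHERE NUM k ∧ chainNode WHERE NUM k < (DESK.length : Int)) ∧
    (PySem.List.pyGetD DESK (chainNode WHERE NUM k) 0 ≠ -1 ∨
      ((-(WHERE.length : Int) ≤ chainNode WHERE NUM k ∧ chainNode WHERE NUM k < (WHERE.length : Int)) ∧
       linkStep WHERE (chainNode WHERE NUM k) < 0))
instance (NUM : Int) (DESK : List Int) (WHERE : List Int) : Decidable (Pre_search NUM DESK WHERE) := by unfold Pre_search; infer_instance

def pvWitness_search : Int × List Int × List Int := (0, [-1, 7], [1, -5])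

def Spec_search (NUM : Int) (DESK : List Int) (WHERE : List Int) (out : Int) : Prop := out = search_alt NUM DESK WHERE
instance (NUM : Int) (DESK : List Int) (WHERE : List Int) (out : Int) : Decidable (Spec_search NUM DESK WHERE out) := by unfold Spec_search; infer_instance

-- ===== CLAIM (what is proved, stated in full; the proofs are below) =====
def Claim_equal_search : Prop := ∀ (NUM : Int) (DESK : List Int) (WHERE : List Int), Dom_search NUM DESK WHERE → Pre_search NUM DESK WHERE → Spec_search NUM DESK WHERE (search NUM DESK WHERE)

-- ===== LEMMAS AND PROOFS =====

lemma pyGetD_of_pyGet?_some {α : Type} {xs : List α} {i : Int} {x d : α}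
    (h : PySem.List.pyGet? xs i = some x) : PySem.List.pyGetD xs i d = x := by
  simp [PySem.List.pyGetD, h]

lemma pyGet?_eq_some_getD {xs : List Int} {i : Int}
    (h1 : -(xs.length : Int) ≤ i) (h2 : i < (xs.length : Int)) :
    PySem.List.pyGet? xs i = some (PySem.List.pyGetD xs i 0) := by
  cases h : PySem.List.pyGet? xs i with
  | none =>
    rw [PySem.List.pyGet?_eq_none_iff] at h
    exact absurd (by simp [PySem.Raise.InRange]; omega) h
  | some x => rw [pyGetD_of_pyGet?_some h]

-- proof-side characterisation of "the chase from cur terminates within fuel steps"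
def chaseStops (DESK : List Int) (WHERE : List Int) : Nat → Int → Bool
  | 0, _ => false
  | Nat.succ fuel, cur =>
    match PySem.List.pyGet? DESK cur with
    | none => false
    | some d =>
      if d ≠ -1 then true
      else
        match PySem.List.pyGet? WHERE cur with
        | none => false
        | some w => if w < 0 then true else chaseStops DESK WHERE fuel w

lemma chainNode_zero (WHERE : List Int) (c : Int) : chainNode WHERE c 0 = c := rfl

lemma chainNode_shift (WHERE : List Int) (c : Int) (j : Nat) :
    chainNode WHERE (linkStep WHERE c) j = chainNode WHERE c (j + 1) :=
  (Function.iterate_succ_apply (linkStep WHERE) j c).symm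

lemma chain_to_chase (DESK WHERE : List Int) :
    ∀ (k : Nat), ∀ (fuel : Nat) (cur : Int), k < fuel →
    (∀ j < k,
      (-(DESK.length : Int) ≤ chainNode WHERE cur j ∧ chainNode WHERE cur j < (DESK.length : Int)) ∧
      PySem.List.pyGetD DESK (chainNode WHERE cur j) 0 = -1 ∧
      (-(WHERE.length : Int) ≤ chainNode WHERE cur j ∧ chainNode WHERE cur j < (WHERE.length : Int)) ∧
      0 ≤ linkStep WHERE (chainNode WHERE cur j)) →
    ((-(DESK.length : Int) ≤ chainNode WHERE cur k ∧ chainNode WHERE cur k < (DESK.length : Int)) ∧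
     (PySem.List.pyGetD DESK (chainNode WHERE cur k) 0 ≠ -1 ∨
       ((-(WHERE.length : Int) ≤ chainNode WHERE cur k ∧ chainNode WHERE cur k < (WHERE.length : Int)) ∧
        linkStep WHERE (chainNode WHERE cur k) < 0))) →
    chaseStops DESK WHERE fuel cur = true := by
  intro k
  induction k with
  | zero =>
    intro fuel cur hf _ hstop
    rw [chainNode_zero] at hstop
    obtain ⟨⟨h1, h2⟩, hs⟩ := hstop
    match fuel, hf with
    | Nat.succ f, _ =>
      simp only [chaseStops]
      rw [pyGet?_eq_some_getD h1 h2]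
      by_cases hd : PySem.List.pyGetD DESK cur 0 ≠ -1
      · simp [hd]
      · rcases hs with hs | ⟨⟨hw1, hw2⟩, hneg⟩
        · exact absurd hs hd
        · simp only [hd, ite_false]
          rw [pyGet?_eq_some_getD hw1 hw2]
          simp [linkStep] at hneg
          simp [hneg]
  | succ k ih =>
    intro fuel cur hf hall hstop
    obtain ⟨⟨h1, h2⟩, hd, ⟨hw1, hw2⟩, hpos⟩ :=
      (by simpa [chainNode_zero] using hall 0 (Nat.succ_pos k))
    match fuel, hf with
    | Nat.succ f, hf =>
      simp only [chaseStops]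
      rw [pyGet?_eq_some_getD h1 h2, hd]
      simp only [ne_eq, not_true_eq_false, ite_false]
      rw [pyGet?_eq_some_getD hw1 hw2]
      have hnn : ¬ (PySem.List.pyGetD WHERE cur 0 < 0) := by
        simp [linkStep] at hpos; omega
      simp only [hnn, ite_false]
      apply ih f (linkStep WHERE cur) (by omega)
      · intro j hj
        rw [chainNode_shift]
        exact hall (j + 1) (by omega)
      · rw [chainNode_shift]
        exact hstop

lemma go_eq (fuel : Nat) : ∀ (cur : Int) (DESK WHERE : List Int) (path : List Int),
    chaseStops DESK WHERE fuel cur = true →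
    (searchGo fuel cur DESK WHERE).1 =
      (if PySem.List.pyGetD DESK (altLoop DESK WHERE fuel cur path).1 0 ≠ -1
       then PySem.List.pyGetD DESK (altLoop DESK WHERE fuel cur path).1 0
       else -(PySem.List.pyGetD WHERE (altLoop DESK WHERE fuel cur path).1 0)) := by
  induction fuel with
  | zero => intro cur DESK WHERE path h; simp [chaseStops] at h
  | succ fuel ih =>
    intro cur DESK WHERE path h
    simp only [chaseStops, searchGo, altLoop] at *
    cases hd : PySem.List.pyGet? DESK cur with
    | none => simp [hd] at h
    | some d =>
      simp only [hd] at h ⊢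
      by_cases hne : d ≠ -1
      · simp [hne, pyGetD_of_pyGet?_some hd]
      · push Not at hne
        subst hne
        simp only [ne_eq, not_true_eq_false, ite_false, reduceIte] at h ⊢
        cases hw : PySem.List.pyGet? WHERE cur with
        | none => simp [hw] at h
        | some w =>
          simp only [hw] at h ⊢
          by_cases hneg : w < 0
          · have : ¬ (0 ≤ w) := by omega
            simp [hneg, this, pyGetD_of_pyGet?_some hd, pyGetD_of_pyGet?_some hw]
          · have h0 : 0 ≤ w := by omega
            simp only [if_neg hneg, if_pos h0] at h ⊢
            exact ih w DESK WHERE (path ++ [cur]) h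

-- ===== VERDICT (by name: the statement is the Claim_ definition above) =====
theorem search_spec : Claim_equal_search := by
  intro NUM DESK WHERE _ hpre
  obtain ⟨k, hk, hall, hstop⟩ := hpre
  have hchase : chaseStops DESK WHERE (2 * DESK.length + 1) NUM = true :=
    chain_to_chase DESK WHERE k (2 * DESK.length + 1) NUM (by omega) hall hstop
  unfold Spec_search search search_alt altFill
  simpa using go_eq (2 * DESK.length + 1) NUM DESK WHERE [] hchase
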